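-- pv_equiv track=rewrite | github.com/yankeguo/weavbot | weavbot/agent/compact.py | _split_turns
-- ===== SOURCE A (Python) =====
-- from typing import TYPE_CHECKING, Any
--
-- def _split_turns(messages: list[dict[str, Any]]) -> list[list[dict[str, Any]]]:
--     turns: list[list[dict[str, Any]]] = []
--     current: list[dict[str, Any]] = []
--     for m in messages:
--         if m.get("role") == "user" and current:
--             turns.append(current)
--             current = [m]
--         else:
--             current.append(m)
--     if current:
--         turns.append(current)
--     return turns
-- ===== SOURCE B (Python) =====
-- def _split_turns(messages):
--     # Two-phase: collect boundary indices (user messages after position 0), then slice.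
--     bounds = [i for i, m in enumerate(messages) if i > 0 and m.get("role") == "user"]
--     starts = [0] + bounds
--     ends = bounds + [len(messages)]
--     return [messages[s:e] for s, e in zip(starts, ends)] if messages else []
-- ===== Notes on version B (the rewrite author's own statement) =====
-- stated objective: alternative
-- what changed: Replaced the incremental accumulator loop (current turn grown message by message, flushed at each boundary) by a two-phase index-then-slice shape: one pass collects the boundary indices i>0 where role=='user', then the result is built by slicing the list between consecutive boundaries.
import Mathlib
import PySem

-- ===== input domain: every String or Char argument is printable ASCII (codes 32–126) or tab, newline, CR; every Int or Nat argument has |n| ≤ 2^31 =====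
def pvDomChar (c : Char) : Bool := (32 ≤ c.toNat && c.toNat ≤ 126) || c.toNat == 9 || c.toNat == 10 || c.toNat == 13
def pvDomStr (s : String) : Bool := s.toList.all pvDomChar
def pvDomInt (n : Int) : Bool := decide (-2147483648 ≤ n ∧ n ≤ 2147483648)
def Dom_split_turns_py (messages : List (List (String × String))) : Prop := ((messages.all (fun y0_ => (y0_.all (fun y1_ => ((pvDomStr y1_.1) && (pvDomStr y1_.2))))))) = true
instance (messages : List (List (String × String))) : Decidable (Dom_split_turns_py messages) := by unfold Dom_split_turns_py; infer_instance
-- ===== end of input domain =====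

-- B replaces A's incremental accumulator loop by a two-phase index-then-slice construction
-- (collect the boundary indices i>0 with role=='user', then slice between consecutive boundaries);
-- same O(n) cost, alternative decomposition.

-- ===== PORT A =====
-- shared primitive test: m.get("role") == "user"
def pvIsUser (m : List (String × String)) : Bool :=
  (PySem.Dict.mk m).get? "role" == some "user"

def split_turns_py (messages : List (List (String × String))) : List (List (List (String × String))) :=
  let st := messages.foldl
    (fun (acc : List (List (List (String × String))) × List (List (String × String))) m =>
      if pvIsUser m && !acc.2.isEmpty then (acc.1 ++ [acc.2], [m]) else (acc.1, acc.2 ++ [m]))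
    ([], [])
  if st.2.isEmpty then st.1 else st.1 ++ [st.2]

-- ===== PORT B =====
def split_turns_py_alt (messages : List (List (String × String))) : List (List (List (String × String))) :=
  let bounds : List Int :=
    ((PySem.List.enumerate messages).filter (fun p => decide (0 < p.1) && pvIsUser p.2)).map (·.1)
  let starts := 0 :: bounds
  let ends := bounds ++ [(messages.length : Int)]
  if messages.isEmpty then []
  else (starts.zip ends).map (fun p => PySem.List.slice messages (some p.1) (some p.2))

-- ===== PRECONDITION & SPEC =====
def Spec_split_turns_py (messages : List (List (String × String))) (out : List (List (List (String × String)))) : Prop := out = split_turns_py_alt messages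
instance (messages : List (List (String × String))) (out : List (List (List (String × String)))) : Decidable (Spec_split_turns_py messages out) := by unfold Spec_split_turns_py; infer_instance

-- ===== CLAIM (what is proved, stated in full; the proofs are below) =====
def Claim_equal_split_turns_py : Prop := ∀ (messages : List (List (String × String))), Dom_split_turns_py messages → Spec_split_turns_py messages (split_turns_py messages)

-- ===== LEMMAS AND PROOFS =====

-- the boundary-index list of B, as a standalone definition for the proofs
def pvBounds (xs : List (List (String × String))) : List Int :=
  ((PySem.List.enumerate xs).filter (fun p => decide (0 < p.1) && pvIsUser p.2)).map (·.1)

-- A's loop body, standalone for the proofs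
def pvStep (acc : List (List (List (String × String))) × List (List (String × String)))
    (m : List (String × String)) :
    List (List (List (String × String))) × List (List (String × String)) :=
  if pvIsUser m && !acc.2.isEmpty then (acc.1 ++ [acc.2], [m]) else (acc.1, acc.2 ++ [m])

lemma pvA_eq (messages : List (List (String × String))) :
    split_turns_py messages =
      (if (messages.foldl pvStep ([], [])).2.isEmpty then (messages.foldl pvStep ([], [])).1
       else (messages.foldl pvStep ([], [])).1 ++ [(messages.foldl pvStep ([], [])).2]) := rfl

lemma pvB_eq (xs : List (List (String × String))) :
    split_turns_py_alt xs =
      (if xs.isEmpty then []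
       else ((0 :: pvBounds xs).zip (pvBounds xs ++ [(xs.length : Int)])).map
         (fun p => PySem.List.slice xs (some p.1) (some p.2))) := rfl

lemma pvBounds_mem {xs : List (List (String × String))} {b : Int} (hb : b ∈ pvBounds xs) :
    0 ≤ b ∧ b < (xs.length : Int) := by
  simp only [pvBounds, List.mem_map, List.mem_filter] at hb
  obtain ⟨p, ⟨hp, hq⟩, rfl⟩ := hb
  rw [PySem.List.mem_enumerate_iff] at hp
  obtain ⟨k, hk, rfl⟩ := hp
  simp only [zero_add]
  omega

lemma pvBounds_snoc_user {xs : List (List (String × String))} {x : List (String × String)}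
    (hxs : xs ≠ []) (hu : pvIsUser x = true) :
    pvBounds (xs ++ [x]) = pvBounds xs ++ [(xs.length : Int)] := by
  have hn : (0 : Int) < xs.length := by
    have := List.length_pos_iff.mpr hxs; exact_mod_cast this
  simp [pvBounds, PySem.List.enumerate_append, PySem.List.enumerate_cons,
    PySem.List.enumerate_nil, List.filter_append]
  exact ⟨x, by simp [List.filter, hu, List.length_pos_iff.mpr hxs]⟩

lemma pvBounds_snoc_not {xs : List (List (String × String))} {x : List (String × String)}
    (hu : pvIsUser x = false) :
    pvBounds (xs ++ [x]) = pvBounds xs := by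
  simp [pvBounds, PySem.List.enumerate_append, PySem.List.enumerate_cons,
    PySem.List.enumerate_nil, List.filter_append, hu]

lemma pvZip_snocR (a : Int) (bs : List Int) (n : Int) :
    (a :: bs).zip (bs ++ [n]) = (a :: bs).zip bs ++ [(bs.getLastD a, n)] := by
  induction bs generalizing a with
  | nil => rfl
  | cons b t ih =>
    have h1 : (a :: b :: t).zip ((b :: t) ++ [n]) = (a, b) :: (b :: t).zip (t ++ [n]) := rfl
    have h2 : (a :: b :: t).zip (b :: t) = (a, b) :: (b :: t).zip t := rfl
    rw [List.cons_append] at h1 ⊢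
    rw [h1, ih b, h2, List.getLastD_cons]
    rfl

lemma pvSlice_stable {α : Type} (xs : List α) (x : α) (s e : Int)
    (hs : 0 ≤ s) (he : 0 ≤ e) (hen : e ≤ (xs.length : Int)) :
    PySem.List.slice (xs ++ [x]) (some s) (some e) = PySem.List.slice xs (some s) (some e) := by
  rw [PySem.List.slice_toNat _ hs he, PySem.List.slice_toNat _ hs he]
  by_cases h : s.toNat ≤ xs.length
  · rw [List.drop_append_of_le_length h,
      List.take_append_of_le_length (by simp only [List.length_drop]; omega)]
  · have h0 : e.toNat - s.toNat = 0 := by omega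
    simp [h0]

lemma pvSlice_ext {α : Type} (xs : List α) (x : α) (s : Int)
    (hs : 0 ≤ s) (hsn : s ≤ (xs.length : Int)) :
    PySem.List.slice (xs ++ [x]) (some s) (some ((xs.length : Int) + 1)) =
      PySem.List.slice xs (some s) (some (xs.length : Int)) ++ [x] := by
  rw [PySem.List.slice_toNat _ hs (by omega), PySem.List.slice_toNat _ hs (by omega)]
  rw [List.drop_append_of_le_length (by omega)]
  rw [List.take_of_length_le (by
        simp only [List.length_append, List.length_drop, List.length_cons, List.length_nil]
        omega),
      List.take_of_length_le (by simp only [List.length_drop]; omega)]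

lemma pvB_singleton (x : List (String × String)) :
    split_turns_py_alt [x] = [[x]] := by
  rw [pvB_eq]
  have hB : pvBounds [x] = [] := by
    simp [pvBounds, PySem.List.enumerate_cons, PySem.List.enumerate_nil]
  simp only [hB, List.isEmpty_cons, List.nil_append, List.length_cons, List.length_nil,
    Nat.cast_one, Nat.zero_add, if_neg (by simp : ¬((false : Bool) = true))]
  rw [show ([(0 : Int)].zip [(1 : Int)]) = [((0 : Int), (1 : Int))] from rfl]
  rw [List.map_cons, List.map_nil,
    PySem.List.slice_toNat _ (by norm_num) (by norm_num)]
  rfl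

lemma pvB_snoc_user {xs : List (List (String × String))} {x : List (String × String)}
    (hxs : xs ≠ []) (hu : pvIsUser x = true) :
    split_turns_py_alt (xs ++ [x]) = split_turns_py_alt xs ++ [[x]] := by
  have hn : (0 : Int) ≤ (xs.length : Int) := by positivity
  have hel : ((xs ++ [x]).length : Int) = (xs.length : Int) + 1 := by
    simp [List.length_append]
  rw [pvB_eq (xs ++ [x]), pvB_eq xs,
    if_neg (by simp : ¬((xs ++ [x]).isEmpty = true)),
    if_neg (by simpa [List.isEmpty_iff] using hxs)]
  rw [pvBounds_snoc_user hxs hu, hel,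
    show (0 :: (pvBounds xs ++ [(xs.length : Int)])) =
      (0 :: pvBounds xs) ++ [(xs.length : Int)] from rfl,
    List.zip_append (by simp), List.map_append]
  congr 1
  · apply List.map_congr_left
    intro p hp
    obtain ⟨s, e⟩ := p
    obtain ⟨h1, h2⟩ := List.of_mem_zip hp
    have hs : 0 ≤ s := by
      rcases List.mem_cons.mp h1 with h | h
      · omega
      · exact (pvBounds_mem h).1
    have he : 0 ≤ e ∧ e ≤ (xs.length : Int) := by
      rcases List.mem_append.mp h2 with h | h
      · obtain ⟨h3, h4⟩ := pvBounds_mem h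
        exact ⟨h3, le_of_lt h4⟩
      · simp only [List.mem_singleton] at h
        exact ⟨by omega, by omega⟩
    exact pvSlice_stable xs x s e hs he.1 he.2
  · rw [show ([(xs.length : Int)].zip [(xs.length : Int) + 1]) =
        [((xs.length : Int), (xs.length : Int) + 1)] from rfl,
      List.map_cons, List.map_nil, pvSlice_ext xs x _ hn le_rfl,
      PySem.List.slice_toNat _ hn hn]
    simp

lemma pvB_snoc_not {xs : List (List (String × String))} {x : List (String × String)}
    (hu : pvIsUser x = false) (T : List (List (List (String × String))))
    (C : List (List (String × String))) (h : split_turns_py_alt xs = T ++ [C]) (hxs : xs ≠ []) :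
    split_turns_py_alt (xs ++ [x]) = T ++ [C ++ [x]] := by
  have hn0 : (0 : Int) ≤ (xs.length : Int) := by positivity
  have hel : ((xs ++ [x]).length : Int) = (xs.length : Int) + 1 := by
    simp [List.length_append]
  have hL : 0 ≤ (pvBounds xs).getLastD 0 ∧ (pvBounds xs).getLastD 0 ≤ (xs.length : Int) := by
    by_cases hB : pvBounds xs = []
    · simp [hB, hn0]
    · have hmem : (pvBounds xs).getLastD 0 ∈ pvBounds xs := by
        rw [List.getLastD_eq_getLast?, List.getLast?_eq_some_getLast hB]
        exact List.getLast_mem hB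
      obtain ⟨h1, h2⟩ := pvBounds_mem hmem
      exact ⟨h1, le_of_lt h2⟩
  rw [pvB_eq xs, if_neg (by simpa [List.isEmpty_iff] using hxs),
    pvZip_snocR, List.map_append] at h
  obtain ⟨hT, hC⟩ := List.append_inj' h (by simp)
  rw [pvB_eq (xs ++ [x]), if_neg (by simp), pvBounds_snoc_not hu, hel,
    pvZip_snocR, List.map_append]
  congr 1
  · rw [← hT]
    apply List.map_congr_left
    intro p hp
    obtain ⟨s, e⟩ := p
    obtain ⟨h1, h2⟩ := List.of_mem_zip hp
    have hs : 0 ≤ s := by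
      rcases List.mem_cons.mp h1 with h | h
      · omega
      · exact (pvBounds_mem h).1
    obtain ⟨h3, h4⟩ := pvBounds_mem h2
    exact pvSlice_stable xs x s e hs h3 (le_of_lt h4)
  · have hCv : PySem.List.slice xs (some ((pvBounds xs).getLastD 0))
        (some (xs.length : Int)) = C := by simpa using hC
    rw [List.map_cons, List.map_nil, pvSlice_ext xs x _ hL.1 hL.2, hCv]

lemma pvInv (xs : List (List (String × String))) (hxs : xs ≠ []) :
    (xs.foldl pvStep ([], [])).2 ≠ [] ∧
      (xs.foldl pvStep ([], [])).1 ++ [(xs.foldl pvStep ([], [])).2] = split_turns_py_alt xs := by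
  induction xs using List.reverseRecOn with
  | nil => exact absurd rfl hxs
  | append_singleton xs x ih =>
    rw [List.foldl_append, List.foldl_cons, List.foldl_nil]
    by_cases hx : xs = []
    · subst hx
      simp only [List.foldl_nil]
      have hstep : pvStep ([], []) x = ([], [x]) := by simp [pvStep]
      rw [hstep]
      exact ⟨by simp, by simpa using (pvB_singleton x).symm⟩
    · obtain ⟨hc, hb⟩ := ih hx
      set st := xs.foldl pvStep ([], []) with hst
      have hne : (!st.2.isEmpty) = true := by
        simp [hc]
      by_cases hu : pvIsUser x = true
      · have : pvStep st x = (st.1 ++ [st.2], [x]) := by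
          simp [pvStep, hu, hne]
        rw [this]
        refine ⟨by simp, ?_⟩
        rw [pvB_snoc_user hx hu]
        simp [hb]
      · have hu' : pvIsUser x = false := by simpa using hu
        have : pvStep st x = (st.1, st.2 ++ [x]) := by
          simp [pvStep, hu']
        rw [this]
        refine ⟨by simp, ?_⟩
        rw [pvB_snoc_not hu' st.1 st.2 hb.symm hx]

-- ===== VERDICT (by name: the statement is the Claim_ definition above) =====
theorem split_turns_py_spec : Claim_equal_split_turns_py := by
  intro messages _
  unfold Spec_split_turns_py
  by_cases h : messages = []
  · subst h; rfl
  · obtain ⟨hc, hb⟩ := pvInv messages h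
    rw [pvA_eq, if_neg (by simpa [List.isEmpty_iff] using hc), hb]
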